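-- pv_equiv track=rewrite | github.com/harry10148/illumio_ops | src/report/analysis/mod15_lateral_movement.py | _bfs_reachability
-- ===== SOURCE A (Python) =====
-- from collections import defaultdict, deque
--
-- def _bfs_reachability(source: str, adjacency: dict[str, set[str]], max_depth: int) -> dict[str, list[str]]:
--     paths: dict[str, list[str]] = {}
--     q: deque[tuple[str, list[str]]] = deque([(source, [source])])
--     while q:
--         node, path = q.popleft()
--         if len(path) - 1 >= max_depth:
--             continue
--         for nxt in sorted(adjacency.get(node, set())):
--             if nxt in path:
--                 continue
--             new_path = path + [nxt]
--             if nxt not in paths: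
--                 paths[nxt] = new_path
--             q.append((nxt, new_path))
--     return paths
-- ===== SOURCE B (Python) =====
-- def _bfs_reachability(source: str, adjacency: dict[str, set[str]], max_depth: int) -> dict[str, list[str]]:
--     paths: dict[str, list[str]] = {}
--     visited = {source}
--     frontier = [(source, [source])]
--     depth = 0
--     while frontier and depth < max_depth:
--         next_frontier = []
--         for node, path in frontier:
--             for nxt in sorted(adjacency.get(node, set())):
--                 if nxt not in visited:
--                     visited.add(nxt)
--                     new_path = path + [nxt]
--                     paths[nxt] = new_path
--                     next_frontier.append((nxt, new_path))
--         frontier = next_frontier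
--         depth += 1
--     return paths
-- ===== Notes on version B (the rewrite author's own statement) =====
-- stated objective: alternative
-- what changed: A drives a deque of simple paths, re-enqueueing an already-discovered node once per simple path that reaches it; B is a level-by-level BFS with a global visited set that expands each node exactly once, producing the identical first-discovery paths dict (same keys, values and insertion order).
import Mathlib
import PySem

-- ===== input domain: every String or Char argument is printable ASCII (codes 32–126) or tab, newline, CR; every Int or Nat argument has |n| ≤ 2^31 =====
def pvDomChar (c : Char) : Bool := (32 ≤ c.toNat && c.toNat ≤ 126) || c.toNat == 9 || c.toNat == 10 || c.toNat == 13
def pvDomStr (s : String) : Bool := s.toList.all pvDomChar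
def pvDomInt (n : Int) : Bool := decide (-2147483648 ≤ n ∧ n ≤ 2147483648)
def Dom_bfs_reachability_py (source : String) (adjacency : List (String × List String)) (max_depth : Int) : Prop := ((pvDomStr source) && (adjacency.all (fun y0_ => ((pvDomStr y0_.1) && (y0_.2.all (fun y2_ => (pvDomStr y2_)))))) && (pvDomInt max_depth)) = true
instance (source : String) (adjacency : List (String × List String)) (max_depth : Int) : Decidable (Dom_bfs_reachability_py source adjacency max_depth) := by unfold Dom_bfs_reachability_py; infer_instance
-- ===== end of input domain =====

-- B replaces A's queue of simple paths (which re-enqueues a discovered node once per simple path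
-- reaching it) by a level-by-level BFS with a global visited set, expanding each node exactly once;
-- the returned dict is identical (same keys, values and insertion order).

-- ===== PORT A =====
-- sorted(adjacency.get(node, set())) — shared by both ports (the same expression occurs in both Pythons)
def pvNbrs (adjacency : List (String × List String)) (node : String) : List String :=
  PySem.List.sorted ((PySem.Dict.mk adjacency).getD node PySem.Set.empty) (fun x => x) false

-- body of A's inner `for nxt in sorted(...)` loop, state = (queue-to-the-right-of-the-head, paths)
def pvStepA (path : List String) (s : List (String × List String) × PySem.Dict String (List String)) (nxt : String) : List (String × List String) × PySem.Dict String (List String) :=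
  if nxt ∈ path then s
  else (s.1 ++ [(nxt, path ++ [nxt])], if s.2.contains nxt then s.2 else s.2.insert nxt (path ++ [nxt]))

-- termination measure for A's queue loop (used only by `decreasing_by` below)
def pvU (adjacency : List (String × List String)) : List String := (adjacency.map Prod.snd).flatten
def pvPhi (adjacency : List (String × List String)) (p : List String) : Nat :=
  ((pvU adjacency).dedup.filter (fun u => decide (u ∉ p))).length
def pvMeasure (adjacency : List (String × List String)) (q : List (String × List String)) : Nat :=
  (q.map (fun e => ((pvU adjacency).length + 1) ^ pvPhi adjacency e.2)).sum

lemma pvFoldA_fst (path : List String) : ∀ (ns : List String) (q : List (String × List String)) (paths : PySem.Dict String (List String)),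
    (ns.foldl (pvStepA path) (q, paths)).1
      = q ++ (ns.filter (fun x => decide (x ∉ path))).map (fun n => (n, path ++ [n])) := by
  intro ns
  induction ns with
  | nil => intro q paths; simp
  | cons m ns ih =>
    intro q paths
    by_cases hm : m ∈ path
    · simp [pvStepA, hm, ih]
    · simp [pvStepA, hm, ih]

lemma pvGetD_or (adjacency : List (String × List String)) (node : String) :
    (PySem.Dict.mk adjacency).getD node PySem.Set.empty = PySem.Set.empty ∨
      (PySem.Dict.mk adjacency).getD node PySem.Set.empty ∈ adjacency.map Prod.snd := by
  induction adjacency with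
  | nil =>
    left
    simp [PySem.Dict.getD_eq_get?_getD, PySem.Dict.get?]
  | cons a tl ih =>
    rw [PySem.Dict.getD_eq_get?_getD]
    rcases a with ⟨k, v⟩
    rw [PySem.Dict.get?_mk_cons]
    by_cases hk : (k == node) = true
    · right; simp [hk]
    · rw [if_neg hk, ← PySem.Dict.getD_eq_get?_getD]
      rcases ih with h | h
      · left; exact h
      · right; simp only [List.map_cons, List.mem_cons]; right; exact h

lemma pvNbrs_subset (adjacency : List (String × List String)) (node : String) :
    ∀ x ∈ pvNbrs adjacency node, x ∈ pvU adjacency := by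
  intro x hx
  rw [pvNbrs, PySem.List.mem_sorted] at hx
  rcases pvGetD_or adjacency node with h | h
  · rw [h] at hx; simp [PySem.Set.empty] at hx
  · exact List.mem_flatten.mpr ⟨_, h, hx⟩

lemma pvNbrs_length_le (adjacency : List (String × List String)) (node : String) :
    (pvNbrs adjacency node).length ≤ (pvU adjacency).length := by
  rw [pvNbrs, PySem.List.length_sorted]
  rcases pvGetD_or adjacency node with h | h
  · rw [h]; simp [PySem.Set.empty]
  · have : ∀ (L : List (List String)) (l : List String), l ∈ L → l.length ≤ L.flatten.length := by
      intro L
      induction L with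
      | nil => intro l h; simp at h
      | cons a L ih =>
        intro l h
        rcases List.mem_cons.mp h with rfl | hmem
        · simp
        · have := ih l hmem
          simp only [List.flatten_cons, List.length_append]
          omega
    exact this _ _ h

lemma pvPhi_append_lt (adjacency : List (String × List String)) (p : List String) (m : String)
    (hmU : m ∈ pvU adjacency) (hmp : m ∉ p) : pvPhi adjacency (p ++ [m]) < pvPhi adjacency p := by
  unfold pvPhi
  have hcong : ((pvU adjacency).dedup.filter (fun u => decide (u ∉ p ++ [m])))
      = ((pvU adjacency).dedup.filter (fun u => decide (u ∉ p))).filter (fun u => decide (u ≠ m)) := by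
    rw [List.filter_filter]
    apply List.filter_congr
    intro u _
    by_cases h1 : u ∈ p <;> by_cases h2 : u = m <;> simp [h1, h2, List.mem_append]
  rw [hcong]
  apply List.length_filter_lt_length_iff_exists.mpr
  refine ⟨m, ?_, by simp⟩
  rw [List.mem_filter]
  exact ⟨List.mem_dedup.mpr hmU, by simp [hmp]⟩

lemma pvMeasure_expand_lt (adjacency : List (String × List String)) (node : String) (path : List String)
    (q : List (String × List String)) (paths : PySem.Dict String (List String)) :
    pvMeasure adjacency ((pvNbrs adjacency node).foldl (pvStepA path) (q, paths)).1
      < pvMeasure adjacency ((node, path) :: q) := by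
  rw [pvFoldA_fst]
  unfold pvMeasure
  rw [List.map_append, List.sum_append, List.map_cons, List.sum_cons]
  -- it remains: sum over the new children < (|U|+1) ^ φ(path)
  have key : ((List.filter (fun x => decide (x ∉ path)) (pvNbrs adjacency node)).map
        (fun n => (n, path ++ [n])) |>.map (fun e => ((pvU adjacency).length + 1) ^ pvPhi adjacency e.2)).sum
      < ((pvU adjacency).length + 1) ^ pvPhi adjacency path := by
    set B := (pvU adjacency).length with hB
    set fl := List.filter (fun x => decide (x ∉ path)) (pvNbrs adjacency node) with hfl
    by_cases hne : fl = []
    · rw [hne]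
      simp
    · -- fl nonempty: pick a member to show φ(path) ≥ 1
      obtain ⟨m0, hm0⟩ := List.exists_mem_of_ne_nil fl hne
      have hm0' := List.mem_filter.mp (hfl ▸ hm0)
      have hm0U : m0 ∈ pvU adjacency := pvNbrs_subset adjacency node m0 hm0'.1
      have hm0p : m0 ∉ path := by simpa using hm0'.2
      have hphi : 1 ≤ pvPhi adjacency path := by
        have := pvPhi_append_lt adjacency path m0 hm0U hm0p
        omega
      -- each child term ≤ (B+1)^(φ(path)-1)
      have hbound : ∀ x ∈ (fl.map (fun n => (n, path ++ [n]))).map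
          (fun e => (B + 1) ^ pvPhi adjacency e.2), x ≤ (B + 1) ^ (pvPhi adjacency path - 1) := by
        intro x hx
        rw [List.map_map, List.mem_map] at hx
        obtain ⟨n, hn, hxe⟩ := hx
        have hn' := List.mem_filter.mp (hfl ▸ hn)
        have hnU : n ∈ pvU adjacency := pvNbrs_subset adjacency node n hn'.1
        have hnp : n ∉ path := by simpa using hn'.2
        have hlt := pvPhi_append_lt adjacency path n hnU hnp
        subst hxe
        show (B + 1) ^ pvPhi adjacency (path ++ [n]) ≤ (B + 1) ^ (pvPhi adjacency path - 1)
        exact Nat.pow_le_pow_right (Nat.succ_le_succ (Nat.zero_le B)) (by omega)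
      have hlen : ((fl.map (fun n => (n, path ++ [n]))).map (fun e => (B + 1) ^ pvPhi adjacency e.2)).length ≤ B := by
        simp only [List.length_map]
        calc fl.length ≤ (pvNbrs adjacency node).length := by rw [hfl]; exact List.length_filter_le _ _
        _ ≤ B := pvNbrs_length_le adjacency node
      calc ((fl.map (fun n => (n, path ++ [n]))).map (fun e => (B + 1) ^ pvPhi adjacency e.2)).sum
          ≤ ((fl.map (fun n => (n, path ++ [n]))).map (fun e => (B + 1) ^ pvPhi adjacency e.2)).length • ((B + 1) ^ (pvPhi adjacency path - 1)) :=
            List.sum_le_card_nsmul _ _ hbound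
        _ ≤ B * (B + 1) ^ (pvPhi adjacency path - 1) := by
            rw [smul_eq_mul]; exact Nat.mul_le_mul_right _ hlen
        _ < (B + 1) * (B + 1) ^ (pvPhi adjacency path - 1) := by
            have : 0 < (B + 1) ^ (pvPhi adjacency path - 1) := Nat.pow_pos (Nat.succ_pos B)
            exact Nat.mul_lt_mul_of_lt_of_le (Nat.lt_succ_self B) (le_refl _) this
        _ = (B + 1) ^ (pvPhi adjacency path) := by
            rw [← pow_succ']
            congr 1
            omega
  have hsnd : pvPhi adjacency (((node, path) : String × List String).2) = pvPhi adjacency path := rfl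
  rw [hsnd]
  omega

-- port of A's `while q:` deque loop (well-founded on pvMeasure)
def pvBfsA (adjacency : List (String × List String)) (max_depth : Int) : List (String × List String) → PySem.Dict String (List String) → PySem.Dict String (List String)
  | [], paths => paths
  | (node, path) :: q, paths =>
    if ((path.length : Int) - 1 ≥ max_depth) then pvBfsA adjacency max_depth q paths
    else
      pvBfsA adjacency max_depth
        ((pvNbrs adjacency node).foldl (pvStepA path) (q, paths)).1
        ((pvNbrs adjacency node).foldl (pvStepA path) (q, paths)).2
termination_by q _ => pvMeasure adjacency q
decreasing_by
  · unfold pvMeasure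
    simp only [List.map_cons, List.sum_cons]
    have : 0 < ((pvU adjacency).length + 1) ^ pvPhi adjacency path := Nat.pow_pos (Nat.succ_pos _)
    omega
  · exact pvMeasure_expand_lt adjacency node path q paths

def bfs_reachability_py (source : String) (adjacency : List (String × List String)) (max_depth : Int) : List (String × List String) :=
  (pvBfsA adjacency max_depth [(source, [source])] PySem.Dict.empty).items

-- ===== PORT B =====
-- body of B's inner `for nxt in sorted(...)` loop, state = (next_frontier, visited, paths)
def pvStepBN (path : List String) (s : List (String × List String) × PySem.Set String × PySem.Dict String (List String)) (nxt : String) : List (String × List String) × PySem.Set String × PySem.Dict String (List String) :=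
  if PySem.Set.contains s.2.1 nxt then s
  else (s.1 ++ [(nxt, path ++ [nxt])], PySem.Set.add s.2.1 nxt, s.2.2.insert nxt (path ++ [nxt]))

-- body of B's `for node, path in frontier` loop
def pvStepB (adjacency : List (String × List String)) (s : List (String × List String) × PySem.Set String × PySem.Dict String (List String)) (e : String × List String) : List (String × List String) × PySem.Set String × PySem.Dict String (List String) :=
  (pvNbrs adjacency e.1).foldl (pvStepBN e.2) s

-- B's `while frontier and depth < max_depth` loop, counting the remaining levels down
def pvBfsB (adjacency : List (String × List String)) : Nat → List (String × List String) → PySem.Set String → PySem.Dict String (List String) → PySem.Dict String (List String)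
  | 0, _, _, paths => paths
  | k + 1, frontier, vis, paths =>
    if frontier.isEmpty then paths
    else
      pvBfsB adjacency k
        (frontier.foldl (pvStepB adjacency) ([], vis, paths)).1
        (frontier.foldl (pvStepB adjacency) ([], vis, paths)).2.1
        (frontier.foldl (pvStepB adjacency) ([], vis, paths)).2.2

def bfs_reachability_py_alt (source : String) (adjacency : List (String × List String)) (max_depth : Int) : List (String × List String) :=
  (pvBfsB adjacency max_depth.toNat [(source, [source])] (PySem.Set.ofList [source]) PySem.Dict.empty).items

-- ===== PRECONDITION & SPEC =====
def Spec_bfs_reachability_py (source : String) (adjacency : List (String × List String)) (max_depth : Int) (out : List (String × List String)) : Prop := out = bfs_reachability_py_alt source adjacency max_depth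
instance (source : String) (adjacency : List (String × List String)) (max_depth : Int) (out : List (String × List String)) : Decidable (Spec_bfs_reachability_py source adjacency max_depth out) := by unfold Spec_bfs_reachability_py; infer_instance

-- ===== CLAIM (what is proved, stated in full; the proofs are below) =====
def Claim_equal_bfs_reachability_py : Prop := ∀ (source : String) (adjacency : List (String × List String)) (max_depth : Int), Dom_bfs_reachability_py source adjacency max_depth → Spec_bfs_reachability_py source adjacency max_depth (bfs_reachability_py source adjacency max_depth)


-- ===== LEMMAS AND PROOFS =====

-- the paths-dict component of A's inner fold does not depend on the queue component
lemma pvFoldA_snd (path : List String) : ∀ (ns : List String) (q q' : List (String × List String)) (P : PySem.Dict String (List String)),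
    (ns.foldl (pvStepA path) (q, P)).2 = (ns.foldl (pvStepA path) (q', P)).2 := by
  intro ns
  induction ns with
  | nil => intro q q' P; rfl
  | cons m ns ih =>
    intro q q' P
    by_cases hm : m ∈ path
    · simp only [List.foldl_cons, pvStepA, if_pos hm]; exact ih q q' P
    · simp only [List.foldl_cons, pvStepA, if_neg hm]; exact ih _ _ _

-- A's inner fold only appends to the queue: a queue prefix passes through unchanged
lemma pvFoldA_shift (path : List String) (ns : List String) (a q : List (String × List String)) (P : PySem.Dict String (List String)) :
    ns.foldl (pvStepA path) (a ++ q, P)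
      = (a ++ (ns.foldl (pvStepA path) (q, P)).1, (ns.foldl (pvStepA path) (q, P)).2) := by
  apply Prod.ext
  · rw [pvFoldA_fst, pvFoldA_fst, List.append_assoc]
  · exact pvFoldA_snd path ns (a ++ q) q P

-- names discovered so far (keys of paths) together with the source
def pvAllowed (source : String) (P : PySem.Dict String (List String)) (x : String) : Prop :=
  x = source ∨ x ∈ P.keys

-- well-formed queue entry at level lam: a path from source of length lam ending in the entry's node,
-- repetition-free, visiting only discovered names
def pvWfE (source : String) (P : PySem.Dict String (List String)) (lam : Nat) (e : String × List String) : Prop :=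
  e.2.Nodup ∧ e.2.head? = some source ∧ e.2.getLast? = some e.1 ∧ e.2.length = lam ∧
    ∀ x ∈ e.2, pvAllowed source P x

-- A's queue section q is an interleaving of B's pending frontier F with "junk" re-entries of
-- already-expanded nodes (D accumulates the nodes whose first entry lies to the left)
inductive pvMix (source : String) (P : PySem.Dict String (List String)) (lam : Nat) : List String → List (String × List String) → List (String × List String) → Prop
  | nil (D : List String) : pvMix source P lam D [] []
  | real (D : List String) (e : String × List String) (q F : List (String × List String))
      (hw : pvWfE source P lam e) (h : pvMix source P lam (D ++ [e.1]) q F) :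
      pvMix source P lam D (e :: q) (e :: F)
  | junk (D : List String) (e : String × List String) (q F : List (String × List String))
      (hd : e.1 ∈ D) (hw : pvWfE source P lam e) (h : pvMix source P lam D q F) :
      pvMix source P lam D (e :: q) F

lemma pvWfE_mono {source : String} {P P' : PySem.Dict String (List String)} {lam : Nat} {e : String × List String}
    (hm : ∀ x, pvAllowed source P x → pvAllowed source P' x) (h : pvWfE source P lam e) :
    pvWfE source P' lam e :=
  ⟨h.1, h.2.1, h.2.2.1, h.2.2.2.1, fun x hx => hm x (h.2.2.2.2 x hx)⟩

lemma pvMix_mono {source : String} {P P' : PySem.Dict String (List String)} {lam : Nat}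
    {D : List String} {q F : List (String × List String)}
    (hm : ∀ x, pvAllowed source P x → pvAllowed source P' x) (h : pvMix source P lam D q F) :
    pvMix source P' lam D q F := by
  induction h with
  | nil D => exact pvMix.nil D
  | real D e q F hw _ ih => exact pvMix.real D e q F (pvWfE_mono hm hw) ih
  | junk D e q F hd hw _ ih => exact pvMix.junk D e q F hd (pvWfE_mono hm hw) ih

lemma pvMix_append_junk {source : String} {P : PySem.Dict String (List String)} {lam : Nat}
    {D : List String} {q F : List (String × List String)} {e : String × List String}
    (h : pvMix source P lam D q F) (he : e.1 ∈ D ++ F.map Prod.fst) (hw : pvWfE source P lam e) :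
    pvMix source P lam D (q ++ [e]) F := by
  induction h with
  | nil D =>
    simp only [List.map_nil, List.append_nil] at he
    exact pvMix.junk D e [] [] he hw (pvMix.nil D)
  | real D e' q F hw' _ ih =>
    refine pvMix.real D e' (q ++ [e]) F hw' (ih ?_)
    simp only [List.map_cons, List.mem_append, List.mem_cons] at he ⊢
    tauto
  | junk D e' q F hd hw' _ ih => exact pvMix.junk D e' (q ++ [e]) F hd hw' (ih he)

lemma pvMix_append_real {source : String} {P : PySem.Dict String (List String)} {lam : Nat}
    {D : List String} {q F : List (String × List String)} {e : String × List String}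
    (h : pvMix source P lam D q F) (hw : pvWfE source P lam e) :
    pvMix source P lam D (q ++ [e]) (F ++ [e]) := by
  induction h with
  | nil D => exact pvMix.real D e [] [] hw (pvMix.nil (D ++ [e.1]))
  | real D e' q F hw' _ ih => exact pvMix.real D e' (q ++ [e]) (F ++ [e]) hw' ih
  | junk D e' q F hd hw' _ ih => exact pvMix.junk D e' (q ++ [e]) (F ++ [e]) hd hw' ih

lemma pvMix_length {source : String} {P : PySem.Dict String (List String)} {lam : Nat}
    {D : List String} {q F : List (String × List String)} (h : pvMix source P lam D q F) :
    ∀ e ∈ q, e.2.length = lam := by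
  induction h with
  | nil D => intro e he; simp at he
  | real D e' q F hw _ ih =>
    intro e he
    rcases List.mem_cons.mp he with rfl | he
    · exact hw.2.2.2.1
    · exact ih e he
  | junk D e' q F hd hw _ ih =>
    intro e he
    rcases List.mem_cons.mp he with rfl | he
    · exact hw.2.2.2.1
    · exact ih e he

-- the simulation relation between A's state (queue-tail, paths) and B's state (frontier, visited, paths)
def pvRel (source : String) (lam : Nat) (K0 : List String)
    (a : List (String × List String) × PySem.Dict String (List String))
    (b : List (String × List String) × PySem.Set String × PySem.Dict String (List String)) : Prop :=
  a.2 = b.2.2 ∧ pvMix source a.2 lam K0 a.1 b.1 ∧ a.2.keys = K0 ++ b.1.map Prod.fst ∧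
    a.2.keys.Nodup ∧ source ∉ a.2.keys ∧
    ∀ x, PySem.Set.contains b.2.1 x = true ↔ pvAllowed source a.2 x

lemma pvNodupConcat {p : List String} {m : String} (h1 : p.Nodup) (h2 : m ∉ p) : (p ++ [m]).Nodup := by
  refine List.Nodup.append h1 (List.nodup_singleton m) ?_
  intro a ha hb
  simp at hb
  exact h2 (hb ▸ ha)

lemma pvSetContains (s : PySem.Set String) (x : String) : PySem.Set.contains s x = true ↔ x ∈ s := by
  unfold PySem.Set.contains
  exact List.contains_iff_mem

lemma pvNotContains (P : PySem.Dict String (List String)) (m : String) (h : m ∉ P.keys) :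
    P.contains m = false := by
  cases hc : P.contains m
  · rfl
  · exact absurd ((PySem.Dict.contains_iff_mem_keys P m).mp hc) h

lemma pvBfsB_nil (adjacency : List (String × List String)) (k : Nat) (vis : PySem.Set String) (P : PySem.Dict String (List String)) :
    pvBfsB adjacency k [] vis P = P := by
  cases k <;> simp [pvBfsB]

-- every entry at or beyond max_depth is discarded, so such a queue drains with no effect
lemma pvDrain (adjacency : List (String × List String)) (md : Int) :
    ∀ (q : List (String × List String)) (P : PySem.Dict String (List String)),
      (∀ e ∈ q, ((e.2.length : Int) - 1 ≥ md)) → pvBfsA adjacency md q P = P := by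
  intro q
  induction q with
  | nil => intro P _; simp [pvBfsA]
  | cons e q ih =>
    intro P h
    obtain ⟨n, p⟩ := e
    rw [pvBfsA, if_pos (h (n, p) (List.mem_cons_self))]
    exact ih P (fun e he => h e (List.mem_cons_of_mem _ he))

-- THE INNER LEMMA: expanding one entry with path p in A (fold over its sorted neighbours,
-- appending to the queue) corresponds to B's inner fold (appending to the next frontier),
-- preserving the simulation relation
lemma pvInner (source : String) (lam : Nat) (p : List String) (K0 : List String)
    (hpN : p.Nodup) (hph : p.head? = some source) (hpl : p.length = lam) :
    ∀ (ns : List String) (q2 nf : List (String × List String)) (vis : PySem.Set String) (P : PySem.Dict String (List String)),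
      (∀ x ∈ p, pvAllowed source P x) →
      pvRel source (lam + 1) K0 (q2, P) (nf, vis, P) →
      pvRel source (lam + 1) K0 (ns.foldl (pvStepA p) (q2, P)) (ns.foldl (pvStepBN p) (nf, vis, P)) ∧
      (∀ x, pvAllowed source P x → pvAllowed source (ns.foldl (pvStepA p) (q2, P)).2 x) ∧
      (∀ m ∈ ns, pvAllowed source (ns.foldl (pvStepA p) (q2, P)).2 m) := by
  have hsrcp : source ∈ p := by
    cases p with
    | nil => simp at hph
    | cons a t => simp at hph; simp [hph]
  have hhead : ∀ m : String, (p ++ [m]).head? = some source := by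
    intro m
    cases p with
    | nil => simp at hph
    | cons a t => simpa using hph
  intro ns
  induction ns with
  | nil =>
    intro q2 nf vis P hp hrel
    exact ⟨hrel, fun x h => h, by simp⟩
  | cons m ns ih =>
    intro q2 nf vis P hp hrel
    obtain ⟨-, hmix, hK, hnd, hs, hvis⟩ := hrel
    by_cases hm : m ∈ p
    · -- neighbour on the current path: both sides skip
      have ha : pvStepA p (q2, P) m = (q2, P) := by simp [pvStepA, hm]
      have hb : pvStepBN p (nf, vis, P) m = (nf, vis, P) := by
        have hcm : m ∈ vis := (pvSetContains vis m).mp ((hvis m).mpr (hp m hm))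
        simp [pvStepBN, hcm]
      rw [List.foldl_cons, ha, List.foldl_cons, hb]
      obtain ⟨hrel', hmono', hns'⟩ := ih q2 nf vis P hp ⟨rfl, hmix, hK, hnd, hs, hvis⟩
      refine ⟨hrel', hmono', ?_⟩
      intro m' hm'
      rcases List.mem_cons.mp hm' with rfl | hm'
      · exact hmono' m' (hp m' hm)
      · exact hns' m' hm'
    · by_cases hall : pvAllowed source P m
      · -- already discovered: A enqueues a junk entry, B skips
        have hmk : m ∈ P.keys := by
          rcases hall with rfl | h
          · exact absurd hsrcp hm
          · exact h
        have ha : pvStepA p (q2, P) m = (q2 ++ [(m, p ++ [m])], P) := by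
          simp [pvStepA, hm, (PySem.Dict.contains_iff_mem_keys P m).mpr hmk]
        have hb : pvStepBN p (nf, vis, P) m = (nf, vis, P) := by
          have hcm : m ∈ vis := (pvSetContains vis m).mp ((hvis m).mpr hall)
          simp [pvStepBN, hcm]
        have hwe : pvWfE source P (lam + 1) (m, p ++ [m]) := by
          refine ⟨pvNodupConcat hpN hm, hhead m, List.getLast?_concat, by simp [hpl], ?_⟩
          intro x hx
          rcases List.mem_append.mp hx with hx | hx
          · exact hp x hx
          · simp at hx; subst hx; exact hall
        have hmix' : pvMix source P (lam + 1) K0 (q2 ++ [(m, p ++ [m])]) nf := by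
          refine pvMix_append_junk hmix ?_ hwe
          rw [← hK]; exact hmk
        rw [List.foldl_cons, ha, List.foldl_cons, hb]
        obtain ⟨hrel', hmono', hns'⟩ := ih _ nf vis P hp ⟨rfl, hmix', hK, hnd, hs, hvis⟩
        refine ⟨hrel', hmono', ?_⟩
        intro m' hm'
        rcases List.mem_cons.mp hm' with rfl | hm'
        · exact hmono' m' hall
        · exact hns' m' hm'
      · -- new discovery: both sides record the path and enqueue
        have hmsrc : m ≠ source := fun h => hall (Or.inl h)
        have hmk : m ∉ P.keys := fun h => hall (Or.inr h)
        have hcont : P.contains m = false := pvNotContains P m hmk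
        have hvismf : PySem.Set.contains vis m = false := by
          cases hc : PySem.Set.contains vis m
          · rfl
          · exact absurd ((hvis m).mp hc) hall
        have ha : pvStepA p (q2, P) m = (q2 ++ [(m, p ++ [m])], P.insert m (p ++ [m])) := by
          simp [pvStepA, hm, hcont]
        have hb : pvStepBN p (nf, vis, P) m
            = (nf ++ [(m, p ++ [m])], PySem.Set.add vis m, P.insert m (p ++ [m])) := by
          have hnm : m ∉ vis := fun h => by rw [(pvSetContains vis m).mpr h] at hvismf; cases hvismf
          simp [pvStepBN, hnm]
        have hkeys' : (P.insert m (p ++ [m])).keys = P.keys ++ [m] :=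
          PySem.Dict.keys_insert_of_not_contains P _ hcont
        have hmono1 : ∀ x, pvAllowed source P x → pvAllowed source (P.insert m (p ++ [m])) x := by
          intro x hx
          rcases hx with rfl | hx
          · exact Or.inl rfl
          · exact Or.inr (by rw [hkeys']; exact List.mem_append_left _ hx)
        have hwe : pvWfE source (P.insert m (p ++ [m])) (lam + 1) (m, p ++ [m]) := by
          refine ⟨pvNodupConcat hpN hm, hhead m, List.getLast?_concat, by simp [hpl], ?_⟩
          intro x hx
          rcases List.mem_append.mp hx with hx | hx
          · exact hmono1 x (hp x hx)
          · simp at hx; subst hx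
            exact Or.inr (by rw [hkeys']; exact List.mem_append_right _ (by simp))
        have hmix' : pvMix source (P.insert m (p ++ [m])) (lam + 1) K0
            (q2 ++ [(m, p ++ [m])]) (nf ++ [(m, p ++ [m])]) :=
          pvMix_append_real (pvMix_mono hmono1 hmix) hwe
        have hK' : (P.insert m (p ++ [m])).keys = K0 ++ (nf ++ [(m, p ++ [m])]).map Prod.fst := by
          rw [hkeys', hK]; simp
        have hnd' : (P.insert m (p ++ [m])).keys.Nodup := by
          rw [hkeys']
          exact pvNodupConcat hnd hmk
        have hs' : source ∉ (P.insert m (p ++ [m])).keys := by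
          rw [hkeys']
          intro h
          rcases List.mem_append.mp h with h | h
          · exact hs h
          · simp at h; exact hmsrc h.symm
        have hvis' : ∀ x, PySem.Set.contains (PySem.Set.add vis m) x = true ↔
            pvAllowed source (P.insert m (p ++ [m])) x := by
          intro x
          rw [pvSetContains, PySem.Set.mem_add]
          constructor
          · rintro (hx | rfl)
            · exact hmono1 x ((hvis x).mp ((pvSetContains vis x).mpr hx))
            · exact Or.inr (by rw [hkeys']; exact List.mem_append_right _ (by simp))
          · rintro (rfl | hx)
            · exact Or.inl ((pvSetContains vis x).mp ((hvis x).mpr (Or.inl rfl)))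
            · rw [hkeys'] at hx
              rcases List.mem_append.mp hx with hx | hx
              · exact Or.inl ((pvSetContains vis x).mp ((hvis x).mpr (Or.inr hx)))
              · simp at hx; subst hx; exact Or.inr rfl
        rw [List.foldl_cons, ha, List.foldl_cons, hb]
        obtain ⟨hrel', hmono', hns'⟩ := ih _ _ _ _
          (fun x hx => hmono1 x (hp x hx)) ⟨rfl, hmix', hK', hnd', hs', hvis'⟩
        refine ⟨hrel', fun x hx => hmono' x (hmono1 x hx), ?_⟩
        intro m' hm'
        rcases List.mem_cons.mp hm' with rfl | hm'
        · exact hmono' m' (Or.inr (by rw [hkeys']; exact List.mem_append_right _ (by simp)))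
        · exact hns' m' hm'

-- B's inner fold is a no-op on a list of already-visited neighbours
lemma pvStepBN_noop (p : List String) : ∀ (ns : List String) (s : List (String × List String) × PySem.Set String × PySem.Dict String (List String)),
    (∀ m ∈ ns, PySem.Set.contains s.2.1 m = true) → ns.foldl (pvStepBN p) s = s := by
  intro ns
  induction ns with
  | nil => intro s _; rfl
  | cons m ns ih =>
    intro s h
    rw [List.foldl_cons]
    have : pvStepBN p s m = s := by
      have hcm : m ∈ s.2.1 := (pvSetContains _ _).mp (h m (List.mem_cons_self))
      simp [pvStepBN, hcm]
    rw [this]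
    exact ih s (fun m' hm' => h m' (List.mem_cons_of_mem _ hm'))

-- THE MAIN SIMULATION: processing A's queue (current level q1 interleaved with junk entries,
-- then the partially built next level q2) equals B's remaining fold over the pending frontier F1
-- followed by the remaining levels
lemma pvMain (adjacency : List (String × List String)) (source : String) (md : Int) :
    ∀ (k : Nat), 1 ≤ k → ∀ (lam : Nat) (D : List String) (q1 F1 : List (String × List String))
      (P0 : PySem.Dict String (List String)),
      pvMix source P0 lam D q1 F1 →
      ∀ (q2 nf : List (String × List String)) (vis : PySem.Set String) (P : PySem.Dict String (List String)),
      (k : Int) = md - ((lam : Int) - 1) →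
      (∀ x, pvAllowed source P0 x → pvAllowed source P x) →
      pvRel source (lam + 1) (D ++ F1.map Prod.fst) (q2, P) (nf, vis, P) →
      (∀ n ∈ D, ∀ m ∈ pvNbrs adjacency n, pvAllowed source P m) →
      pvBfsA adjacency md (q1 ++ q2) P =
        pvBfsB adjacency (k - 1)
          (F1.foldl (pvStepB adjacency) (nf, vis, P)).1
          (F1.foldl (pvStepB adjacency) (nf, vis, P)).2.1
          (F1.foldl (pvStepB adjacency) (nf, vis, P)).2.2 := by
  intro k
  induction k with
  | zero => intro h; exact absurd h (by omega)
  | succ k ihk =>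
    intro _ lam D q1 F1 P0 hq1
    simp only [Nat.add_sub_cancel]
    induction hq1 with
    | nil D' =>
      intro q2 nf vis P hk hmono hrel hD
      simp only [List.nil_append, List.foldl_nil]
      simp only [List.map_nil, List.append_nil] at hrel
      obtain ⟨-, hmix, hK, hnd, hs, hvis⟩ := hrel
      cases k with
      | zero =>
        simp only [pvBfsB]
        apply pvDrain
        intro e he
        rw [pvMix_length hmix e he]
        push_cast at hk ⊢
        omega
      | succ k' =>
        have hrel' : pvRel source (lam + 1 + 1) (D' ++ nf.map Prod.fst) (([] : List (String × List String)), P) (([] : List (String × List String)), vis, P) := by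
          refine ⟨rfl, pvMix.nil _, ?_, hnd, hs, hvis⟩
          simpa using hK
        have hcall := ihk (by omega) (lam + 1) D' q2 nf P hmix [] [] vis P
          (by push_cast at hk ⊢; omega) (fun x hx => hx) hrel' hD
        simp only [List.append_nil] at hcall
        by_cases hnf : nf = []
        · subst hnf
          simp only [List.foldl_nil] at hcall
          rw [hcall, pvBfsB_nil, pvBfsB_nil]
        · rw [hcall, pvBfsB]
          rw [if_neg (by simp [hnf])]
          rfl
    | real D' e q1' F1' hw hmixr ihr =>
      obtain ⟨n, p⟩ := e
      intro q2 nf vis P hk hmono hrel hD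
      have hlen : p.length = lam := hw.2.2.2.1
      rw [List.cons_append, pvBfsA,
        if_neg (by rw [hlen]; push_cast at hk ⊢; omega), pvFoldA_shift]
      rw [List.foldl_cons]
      simp only [pvStepB]
      set ns := pvNbrs adjacency n with hnsdef
      set YA := ns.foldl (pvStepA p) (q2, P) with hYA
      set YB := ns.foldl (pvStepBN p) (nf, vis, P) with hYB
      obtain ⟨rel₁, mono₁, hns₁⟩ :=
        pvInner source lam p (D' ++ ((n, p) :: F1').map Prod.fst) hw.1 hw.2.1 hlen
          ns q2 nf vis P (fun x hx => hmono x (hw.2.2.2.2 x hx)) hrel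
      rw [← hYA, ← hYB] at rel₁
      have hKcast : D' ++ ((n, p) :: F1').map Prod.fst = (D' ++ [n]) ++ F1'.map Prod.fst := by simp
      rw [hKcast] at rel₁
      have hrel' : pvRel source (lam + 1) ((D' ++ [n]) ++ F1'.map Prod.fst) (YA.1, YA.2) (YB.1, YB.2.1, YA.2) :=
        ⟨rfl, rel₁.2.1, rel₁.2.2.1, rel₁.2.2.2.1, rel₁.2.2.2.2.1, rel₁.2.2.2.2.2⟩
      have hD' : ∀ n' ∈ D' ++ [n], ∀ m ∈ pvNbrs adjacency n', pvAllowed source YA.2 m := by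
        intro n' hn' m hm
        rcases List.mem_append.mp hn' with hn' | hn'
        · exact mono₁ m (hD n' hn' m hm)
        · simp at hn'; subst hn'; exact hns₁ m hm
      have hcall := ihr YA.1 YB.1 YB.2.1 YA.2 hk
        (fun x hx => mono₁ x (hmono x hx)) hrel' hD'
      rw [hcall]
      have hYt : (YB.1, YB.2.1, YA.2) = YB := by rw [rel₁.1]
      rw [hYt]
    | junk D' e q1' F1' hd hw hmixr ihr =>
      obtain ⟨n, p⟩ := e
      intro q2 nf vis P hk hmono hrel hD
      have hlen : p.length = lam := hw.2.2.2.1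
      rw [List.cons_append, pvBfsA,
        if_neg (by rw [hlen]; push_cast at hk ⊢; omega), pvFoldA_shift]
      set ns := pvNbrs adjacency n with hnsdef
      set YA := ns.foldl (pvStepA p) (q2, P) with hYA
      set YB := ns.foldl (pvStepBN p) (nf, vis, P) with hYB
      have hdn : n ∈ D' := hd
      have hallns : ∀ m ∈ ns, pvAllowed source P m := hD n hdn
      obtain ⟨rel₁, mono₁, hns₁⟩ :=
        pvInner source lam p (D' ++ F1'.map Prod.fst) hw.1 hw.2.1 hlen
          ns q2 nf vis P (fun x hx => hmono x (hw.2.2.2.2 x hx)) hrel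
      rw [← hYA, ← hYB] at rel₁
      have hnoop : YB = (nf, vis, P) := by
        rw [hYB]
        exact pvStepBN_noop p ns (nf, vis, P)
          (fun m hm => (hrel.2.2.2.2.2 m).mpr (hallns m hm))
      rw [hnoop] at rel₁
      have ha2 : YA.2 = P := rel₁.1
      have hEta : (YA.1, P) = YA := by rw [← ha2]
      have hcall := ihr YA.1 nf vis P hk hmono (by rw [hEta]; exact rel₁) hD
      rw [ha2, hcall]

-- assembling: the first pop of A's queue (the source entry) against B's first level
lemma pvTop (source : String) (adjacency : List (String × List String)) (md : Int) :
    pvBfsA adjacency md [(source, [source])] PySem.Dict.empty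
      = pvBfsB adjacency md.toNat [(source, [source])] (PySem.Set.ofList [source]) PySem.Dict.empty := by
  by_cases hmd : md ≤ 0
  · rw [pvBfsA, if_pos (by simp; omega)]
    rw [show md.toNat = 0 by omega]
    simp [pvBfsA, pvBfsB]
  · push Not at hmd
    obtain ⟨k', hk'⟩ : ∃ k', md.toNat = k' + 1 := ⟨md.toNat - 1, by omega⟩
    rw [pvBfsA, if_neg (by simp; omega)]
    rw [hk', pvBfsB, if_neg (by simp)]
    simp only [List.foldl_cons, List.foldl_nil, pvStepB]
    set ns := pvNbrs adjacency source with hnsdef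
    set YA := ns.foldl (pvStepA [source]) ([], PySem.Dict.empty) with hYA
    set YB := ns.foldl (pvStepBN [source]) ([], PySem.Set.ofList [source], PySem.Dict.empty) with hYB
    have hvis0 : ∀ x, PySem.Set.contains (PySem.Set.ofList [source]) x = true ↔
        pvAllowed source PySem.Dict.empty x := by
      intro x
      rw [pvSetContains, PySem.Set.mem_ofList]
      simp [pvAllowed, PySem.Dict.keys_empty]
    have hrel0 : pvRel source 2 [] (([] : List (String × List String)), PySem.Dict.empty)
        (([] : List (String × List String)), PySem.Set.ofList [source], PySem.Dict.empty) := by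
      refine ⟨rfl, pvMix.nil [], ?_, ?_, ?_, hvis0⟩ <;> simp [PySem.Dict.keys_empty]
    obtain ⟨rel₁, mono₁, hns₁⟩ :=
      pvInner source 1 [source] [] (by simp) rfl rfl ns [] [] (PySem.Set.ofList [source])
        PySem.Dict.empty (by intro x hx; simp at hx; exact Or.inl hx) hrel0
    rw [← hYA, ← hYB] at rel₁
    have hrel' : pvRel source 2 ([] : List String) (YA.1, YA.2) (YB.1, YB.2.1, YA.2) :=
      ⟨rfl, rel₁.2.1, rel₁.2.2.1, rel₁.2.2.2.1, rel₁.2.2.2.2.1, rel₁.2.2.2.2.2⟩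
    have hcall := pvMain adjacency source md md.toNat (by omega) 1 [] [] [] YA.2
      (pvMix.nil []) YA.1 YB.1 YB.2.1 YA.2
      (by rw [Int.toNat_of_nonneg (by omega)]; ring) (fun x hx => hx)
      (by simpa using hrel') (by intro n hn; simp at hn)
    simp only [List.nil_append, List.foldl_nil] at hcall
    rw [hcall, hk', rel₁.1]
    rfl

lemma pvEq (source : String) (adjacency : List (String × List String)) (md : Int) :
    bfs_reachability_py source adjacency md = bfs_reachability_py_alt source adjacency md := by
  unfold bfs_reachability_py bfs_reachability_py_alt
  rw [pvTop]

-- ===== VERDICT (by name: the statement is the Claim_ definition above) =====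
theorem bfs_reachability_py_spec : Claim_equal_bfs_reachability_py := by
  intro source adjacency max_depth _
  exact pvEq source adjacency max_depth
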